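-- pv_equiv track=rewrite | github.com/s-ilya/yandex-praktikum-algorithms | sprint_2/f_sorted_strings.py | min_indices_removed
-- ===== SOURCE A (Python) =====
-- def min_indices_removed(strings: list) -> int:
--     rows = len(strings)
--
--     if rows <= 1:
--         return 0
--
--     columns = len(strings[0])
--
--     if columns == 0:
--         return 0
--
--     removed_indices = 0
--
--     for column in range(columns):
--         for row in range(1, rows):
--             if strings[row][column] < strings[row - 1][column]:
--                 removed_indices += 1
--                 break
--
--     return removed_indices
-- ===== SOURCE B (Python) =====
-- def min_indices_removed(strings: list) -> int:
--     rows = len(strings)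
--     if rows <= 1:
--         return 0
--     columns = len(strings[0])
--     if columns == 0:
--         return 0
--     bad_columns = set()
--     for row in range(1, rows):
--         for column in range(columns):
--             if strings[row][column] < strings[row - 1][column]:
--                 bad_columns.add(column)
--     return len(bad_columns)
-- ===== Notes on version B (the rewrite author's own statement) =====
-- stated objective: alternative
-- what changed: Row-major full scan collecting offending column indices in a set (len taken at the end) instead of a column-major counter loop with a per-column early break.
-- outside the precondition, e.g. on min_indices_removed(['b', 'a', '']): A returns 1, B raises IndexError
import Mathlib
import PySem

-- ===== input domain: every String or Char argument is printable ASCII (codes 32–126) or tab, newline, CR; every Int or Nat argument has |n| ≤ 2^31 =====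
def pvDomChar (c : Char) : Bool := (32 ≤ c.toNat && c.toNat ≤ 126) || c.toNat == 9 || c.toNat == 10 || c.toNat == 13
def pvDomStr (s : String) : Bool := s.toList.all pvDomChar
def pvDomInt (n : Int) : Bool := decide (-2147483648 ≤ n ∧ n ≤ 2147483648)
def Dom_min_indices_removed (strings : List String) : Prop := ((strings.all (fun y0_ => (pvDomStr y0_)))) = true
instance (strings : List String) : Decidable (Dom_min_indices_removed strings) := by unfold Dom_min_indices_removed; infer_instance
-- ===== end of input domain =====

-- B keeps the same O(rows*columns) cost but a different decomposition: a row-major full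
-- scan collecting offending columns in a set, versus A's column-major counter with break.

-- shared atomic cell comparison: strings[row][column] < strings[row-1][column]
-- (getD defaults are never reached under Pre_, where all indices are in range)
def pvBadPair (strings : List String) (row col : Nat) : Bool :=
  ((strings.getD row "").toList.getD col ' ') < ((strings.getD (row - 1) "").toList.getD col ' ')

-- ===== PORT A =====
-- inner 'for row in range(1, rows): … break' loop of A
def pvAInner (strings : List String) (col : Nat) : List Nat → Int → Int
  | [], acc => acc
  | row :: rest, acc =>
      if pvBadPair strings row col then acc + 1 else pvAInner strings col rest acc

def min_indices_removed (strings : List String) : Int :=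
  let rows := strings.length
  if rows ≤ 1 then 0
  else
    let columns := (strings.getD 0 "").length
    if columns = 0 then 0
    else
      (List.range columns).foldl (fun acc col => pvAInner strings col (List.range' 1 (rows - 1)) acc) 0

-- ===== PORT B =====
def min_indices_removed_alt (strings : List String) : Int :=
  let rows := strings.length
  if rows ≤ 1 then 0
  else
    let columns := (strings.getD 0 "").length
    if columns = 0 then 0
    else
      let bad : PySem.Set Nat :=
        (List.range' 1 (rows - 1)).foldl
          (fun s row =>
            (List.range columns).foldl
              (fun s col => if pvBadPair strings row col then PySem.Set.add s col else s) s)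
          PySem.Set.empty
      PySem.Set.len bad

-- ===== PRECONDITION & SPEC =====
-- Pre_ excludes ragged lists in which some string is shorter than the first: there B's full
-- row-major scan raises IndexError, while A's per-column early break sometimes raises and
-- sometimes still returns a value.
def Pre_min_indices_removed (strings : List String) : Prop :=
  ∀ s ∈ strings, (strings.getD 0 "").length ≤ s.length

instance (strings : List String) : Decidable (Pre_min_indices_removed strings) := by
  unfold Pre_min_indices_removed; infer_instance

def pvWitness_min_indices_removed : List String := ["ab", "ba", "aa"]

def Spec_min_indices_removed (strings : List String) (out : Int) : Prop :=
  out = min_indices_removed_alt strings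
instance (strings : List String) (out : Int) : Decidable (Spec_min_indices_removed strings out) := by
  unfold Spec_min_indices_removed; infer_instance

-- ===== CLAIM (what is proved, stated in full; the proofs are below) =====
def Claim_equal_min_indices_removed : Prop :=
  ∀ (strings : List String), Dom_min_indices_removed strings →
    Pre_min_indices_removed strings →
    Spec_min_indices_removed strings (min_indices_removed strings)

-- ===== LEMMAS AND PROOFS =====

-- the column predicate both programs test: some adjacent pair in this column is out of order
def pvBadCol (strings : List String) (rows col : Nat) : Bool :=
  (List.range' 1 (rows - 1)).any (fun row => pvBadPair strings row col)

theorem pvAInner_eq_any (strings : List String) (col : Nat) (l : List Nat) (acc : Int) :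
    pvAInner strings col l acc = if l.any (fun row => pvBadPair strings row col) then acc + 1 else acc := by
  induction l with
  | nil => simp [pvAInner]
  | cons r rest ih =>
      by_cases h : pvBadPair strings r col <;> simp [pvAInner, h, ih]

theorem pvA_fold_eq_countP (strings : List String) (rows : Nat) (l : List Nat) (acc : Int) :
    l.foldl (fun acc col => pvAInner strings col (List.range' 1 (rows - 1)) acc) acc
      = acc + (l.countP (fun col => pvBadCol strings rows col) : Int) := by
  induction l generalizing acc with
  | nil => simp
  | cons c rest ih =>
      rw [List.foldl_cons, pvAInner_eq_any, List.countP_cons]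
      by_cases h : pvBadCol strings rows c
      · rw [if_pos (by simpa [pvBadCol] using h), ih, if_pos h]
        push_cast; ring
      · rw [if_neg (by simpa [pvBadCol] using h), ih, if_neg h]
        simp

-- membership in the inner (per-row) fold
theorem pvB_inner_mem (strings : List String) (row : Nat) (l : List Nat) (s : PySem.Set Nat) (c : Nat) :
    c ∈ l.foldl (fun s col => if pvBadPair strings row col then PySem.Set.add s col else s) s ↔
      c ∈ s ∨ (c ∈ l ∧ pvBadPair strings row c) := by
  induction l generalizing s with
  | nil => simp
  | cons x rest ih =>
      rw [List.foldl_cons]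
      by_cases h : pvBadPair strings row x
      · rw [if_pos h, ih, PySem.Set.mem_add]
        by_cases hc : c = x
        · subst hc; simp [h]
        · simp [hc, List.mem_cons]
      · rw [if_neg h, ih]
        constructor
        · rintro (hs | ⟨hr, hb⟩)
          · exact Or.inl hs
          · exact Or.inr ⟨List.mem_cons_of_mem _ hr, hb⟩
        · rintro (hs | ⟨hr, hb⟩)
          · exact Or.inl hs
          · rcases List.mem_cons.mp hr with rfl | hr
            · exact absurd hb h
            · exact Or.inr ⟨hr, hb⟩

theorem pvB_inner_nodup (strings : List String) (row : Nat) (l : List Nat) (s : PySem.Set Nat)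
    (hs : s.Nodup) :
    (l.foldl (fun s col => if pvBadPair strings row col then PySem.Set.add s col else s) s).Nodup := by
  induction l generalizing s with
  | nil => exact hs
  | cons x rest ih =>
      simp only [List.foldl_cons]
      by_cases h : pvBadPair strings row x
      · simp only [h, if_true]; exact ih _ (PySem.Set.nodup_add _ _ hs)
      · simp only [h]; exact ih _ hs

-- membership in the outer (over rows) fold
theorem pvB_outer_mem (strings : List String) (columns : Nat) (rl : List Nat) (s : PySem.Set Nat) (c : Nat) :
    c ∈ rl.foldl (fun s row =>
          (List.range columns).foldl
            (fun s col => if pvBadPair strings row col then PySem.Set.add s col else s) s) s ↔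
      c ∈ s ∨ (c < columns ∧ ∃ row ∈ rl, pvBadPair strings row c) := by
  induction rl generalizing s with
  | nil => simp
  | cons r rest ih =>
      simp only [List.foldl_cons, ih, pvB_inner_mem, List.mem_range, List.mem_cons]
      constructor
      · rintro ((h | ⟨hc, hb⟩) | ⟨hc, row, hr, hb⟩)
        · exact Or.inl h
        · exact Or.inr ⟨hc, r, Or.inl rfl, hb⟩
        · exact Or.inr ⟨hc, row, Or.inr hr, hb⟩
      · rintro (h | ⟨hc, row, (rfl | hr), hb⟩)
        · exact Or.inl (Or.inl h)
        · exact Or.inl (Or.inr ⟨hc, hb⟩)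
        · exact Or.inr ⟨hc, row, hr, hb⟩

theorem pvB_outer_nodup (strings : List String) (columns : Nat) (rl : List Nat) (s : PySem.Set Nat)
    (hs : s.Nodup) :
    (rl.foldl (fun s row =>
        (List.range columns).foldl
          (fun s col => if pvBadPair strings row col then PySem.Set.add s col else s) s) s).Nodup := by
  induction rl generalizing s with
  | nil => exact hs
  | cons r rest ih => exact ih _ (pvB_inner_nodup strings r _ s hs)

-- ===== VERDICT (by name: the statement is the Claim_ definition above) =====
theorem min_indices_removed_spec : Claim_equal_min_indices_removed := by
  intro strings _ _
  unfold Spec_min_indices_removed min_indices_removed min_indices_removed_alt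
  set rows := strings.length with hrows
  by_cases h1 : rows ≤ 1
  · simp [h1]
  · simp only [h1, if_false]
    set columns := (strings.getD 0 "").length with hcols
    by_cases h2 : columns = 0
    · simp [h2]
    · simp only [h2, if_false]
      -- A's side is the count of bad columns
      rw [pvA_fold_eq_countP strings rows (List.range columns) 0]
      -- B's side: the set is a permutation of the filtered range
      have hperm :
          ((List.range' 1 (rows - 1)).foldl
            (fun s row =>
              (List.range columns).foldl
                (fun s col => if pvBadPair strings row col then PySem.Set.add s col else s) s)
            PySem.Set.empty).Perm
          ((List.range columns).filter (fun col => pvBadCol strings rows col)) := by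
        rw [List.perm_ext_iff_of_nodup
              (pvB_outer_nodup strings columns _ _ (by simp [PySem.Set.empty]))
              (List.nodup_range.filter _)]
        intro c
        rw [pvB_outer_mem]
        simp only [PySem.Set.empty, List.not_mem_nil, false_or, List.mem_filter,
          List.mem_range, pvBadCol, List.any_eq_true]

      rw [PySem.Set.len, hperm.length_eq, List.countP_eq_length_filter]
      simp
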